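-- pv_equiv track=rewrite | github.com/mateusrfabro/multibet-analytics | segmentacao_app/game_catalog.py | _best_match_smartico
-- ===== SOURCE A (Python) =====
-- def _best_match_smartico(nome_jogo: str, results: list) -> dict | None:
--     """Seleciona o melhor match do Smartico."""
--     nome_upper = nome_jogo.strip().upper()
--
--     # Match exato
--     for r in results:
--         if r['game_name'].strip().upper() == nome_upper:
--             return r
--
--     # Menor nome
--     if results:
--         return min(results, key=lambda r: len(r['game_name']))
--
--     return None
-- ===== SOURCE B (Python) =====
-- def _best_match_smartico(nome_jogo: str, results: list) -> dict | None:
--     """Seleciona o melhor match do Smartico (passagem unica)."""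
--     nome_upper = nome_jogo.strip().upper()
--     best = None
--     for r in results:
--         name = r['game_name']
--         if name.strip().upper() == nome_upper:
--             return r
--         if best is None or len(name) < len(best['game_name']):
--             best = r
--     return best
-- ===== Notes on version B (the rewrite author's own statement) =====
-- stated objective: alternative
-- what changed: B fuses A's two scans (exact-match loop, then min by name length) into a single loop that returns on an exact match and otherwise maintains the running shortest-name candidate with strict <, preserving min's first-occurrence tie-breaking.
import Mathlib
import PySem

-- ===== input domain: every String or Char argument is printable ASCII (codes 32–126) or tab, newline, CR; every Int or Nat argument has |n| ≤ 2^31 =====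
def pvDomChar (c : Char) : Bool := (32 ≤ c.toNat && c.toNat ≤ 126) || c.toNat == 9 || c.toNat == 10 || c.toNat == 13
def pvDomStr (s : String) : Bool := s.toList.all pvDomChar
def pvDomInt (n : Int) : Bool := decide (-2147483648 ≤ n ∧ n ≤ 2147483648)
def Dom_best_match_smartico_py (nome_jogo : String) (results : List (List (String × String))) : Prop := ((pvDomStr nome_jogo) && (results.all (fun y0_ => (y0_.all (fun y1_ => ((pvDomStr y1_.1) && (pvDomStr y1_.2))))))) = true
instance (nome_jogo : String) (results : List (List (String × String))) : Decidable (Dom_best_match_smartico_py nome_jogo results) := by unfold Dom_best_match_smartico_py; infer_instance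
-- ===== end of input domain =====

-- ===== PORT A =====
-- B changes only the decomposition (two scans fused into one); A's behaviour is reproduced exactly.
-- Python dict access r['game_name'] raises KeyError when absent; such inputs are outside Pre_,
-- so the `.getD ""` default below is never reached on admitted inputs.
def pvNorm (s : String) : String := PySem.Str.upper (PySem.Str.strip s)
-- dict → assoc list: r['game_name'] is the FIRST pair with key "game_name" (KeyError = none, outside Pre_)
def pvGameName? (r : List (String × String)) : Option String := (r.find? (fun kv => kv.1 == "game_name")).map (·.2)
def pvName (r : List (String × String)) : String := (pvGameName? r).getD ""

-- first loop of A: return the first exact (strip+upper) match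
def pvExactLoop (nu : String) : List (List (String × String)) → Option (List (String × String))
  | [] => none
  | r :: rs => if pvNorm (pvName r) == nu then some r else pvExactLoop nu rs

def best_match_smartico_py (nome_jogo : String) (results : List (List (String × String))) : Option (List (String × String)) :=
  let nome_upper := pvNorm nome_jogo
  match pvExactLoop nome_upper results with
  | some r => some r
  | none =>
    if results.isEmpty then none
    else PySem.List.min? results (fun r => PySem.Str.len (pvName r))

-- ===== PORT B =====
-- single loop: return on exact match, otherwise keep the running shortest-name candidate (strict <)
def pvBestLoop (nu : String) (best : Option (List (String × String))) :
    List (List (String × String)) → Option (List (String × String))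
  | [] => best
  | r :: rs =>
    if pvNorm (pvName r) == nu then some r
    else
      pvBestLoop nu
        (match best with
         | none => some r
         | some b => if PySem.Str.len (pvName r) < PySem.Str.len (pvName b) then some r else some b) rs

def best_match_smartico_py_alt (nome_jogo : String) (results : List (List (String × String))) : Option (List (String × String)) :=
  pvBestLoop (pvNorm nome_jogo) none results

-- ===== PRECONDITION & SPEC =====
-- Pre_ excludes exactly the inputs where Python raises KeyError: a dict without a 'game_name'
-- key that is reached before any exact match (both A and B raise there at the same element).
def Pre_best_match_smartico_py (nome_jogo : String) (results : List (List (String × String))) : Prop :=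
  ∀ i : Fin results.length, pvGameName? results[i] = none →
    ∃ r ∈ results.take i, ∃ s, pvGameName? r = some s ∧ pvNorm s = pvNorm nome_jogo
instance (nome_jogo : String) (results : List (List (String × String))) : Decidable (Pre_best_match_smartico_py nome_jogo results) := by unfold Pre_best_match_smartico_py; infer_instance

def pvWitness_best_match_smartico_py : String × (List (List (String × String))) :=
  (" abc ", [[("game_name", "xy")], [("game_name", "ABC")]])

def Spec_best_match_smartico_py (nome_jogo : String) (results : List (List (String × String))) (out : Option (List (String × String))) : Prop := out = best_match_smartico_py_alt nome_jogo results
instance (nome_jogo : String) (results : List (List (String × String))) (out : Option (List (String × String))) : Decidable (Spec_best_match_smartico_py nome_jogo results out) := by unfold Spec_best_match_smartico_py; infer_instance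

-- ===== CLAIM (what is proved, stated in full; the proofs are below) =====
def Claim_equal_best_match_smartico_py : Prop := ∀ (nome_jogo : String) (results : List (List (String × String))), Dom_best_match_smartico_py nome_jogo results → Pre_best_match_smartico_py nome_jogo results → Spec_best_match_smartico_py nome_jogo results (best_match_smartico_py nome_jogo results)

-- ===== LEMMAS AND PROOFS =====

-- B's fused loop = (A's exact-match loop, falling back to the running-min fold)
theorem pvBestLoop_eq (nu : String) (rs : List (List (String × String))) :
    ∀ best, pvBestLoop nu best rs =
      match pvExactLoop nu rs with
      | some r => some r
      | none => rs.foldl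
          (fun acc x =>
            match acc with
            | none => some x
            | some m => if PySem.Str.len (pvName x) < PySem.Str.len (pvName m) then some x else some m)
          best := by
  induction rs with
  | nil => intro best; simp [pvBestLoop, pvExactLoop]
  | cons r rs ih =>
    intro best
    by_cases h : pvNorm (pvName r) == nu
    · simp [pvBestLoop, pvExactLoop, h]
    · simp only [pvBestLoop, pvExactLoop, h, if_neg, Bool.false_eq_true, not_false_iff,
        List.foldl_cons]
      rw [ih]

-- A's min(results, key=len∘name) is the same running-min fold, started from none
theorem pvMin?_eq (xs : List (List (String × String))) :
    PySem.List.min? xs (fun r => PySem.Str.len (pvName r)) =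
      xs.foldl
        (fun acc x =>
          match acc with
          | none => some x
          | some m => if PySem.Str.len (pvName x) < PySem.Str.len (pvName m) then some x else some m)
        none := by
  unfold PySem.List.min?
  congr 1
  funext acc x
  cases acc <;> rfl

-- ===== VERDICT (by name: the statement is the Claim_ definition above) =====
theorem best_match_smartico_py_spec : Claim_equal_best_match_smartico_py := by
  intro nome results _ _
  unfold Spec_best_match_smartico_py best_match_smartico_py best_match_smartico_py_alt
  rw [pvBestLoop_eq]
  cases h : pvExactLoop (pvNorm nome) results with
  | some r => simp only [h]
  | none =>
    simp only [h]
    cases results with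
    | nil => rfl
    | cons x xs =>
      simp only [List.isEmpty_cons, Bool.false_eq_true, if_false]
      rw [pvMin?_eq]
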